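-- pv_equiv track=rewrite | github.com/zhi0219/STOCK | tools/verify_powershell_null_safe_trim_contract.py | _variable_indices
-- ===== SOURCE A (Python) =====
-- def _variable_indices(expr: str) -> list[int]:
--     indices: list[int] = []
--     in_single = False
--     in_double = False
--     for idx, char in enumerate(expr):
--         if char == "'" and not in_double:
--             in_single = not in_single
--         elif char == '"' and not in_single:
--             in_double = not in_double
--         if in_single or in_double:
--             continue
--         if char == "$":
--             next_char = expr[idx + 1] if idx + 1 < len(expr) else ""
--             if next_char.isalpha() or next_char in "_{(":
--                 indices.append(idx)
--     return indices
-- ===== SOURCE B (Python) =====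
-- def _variable_indices(expr: str) -> list[int]:
--     # Pass 1: quote mask — inside[i] is True when char i lies in a quoted region
--     # (a quote char that opens a region counts as inside, like the original).
--     inside: list[bool] = []
--     in_single = False
--     in_double = False
--     for ch in expr:
--         if ch == "'" and not in_double:
--             in_single = not in_single
--         elif ch == '"' and not in_single:
--             in_double = not in_double
--         inside.append(in_single or in_double)
--     # Pass 2: collect '$' positions outside quotes whose follower starts a variable.
--     return [i for i, ch in enumerate(expr)
--             if not inside[i] and ch == "$"
--             and (expr[i + 1:i + 2].isalpha() or expr[i + 1:i + 2] in "_{(")]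
-- ===== Notes on version B (the rewrite author's own statement) =====
-- stated objective: alternative
-- what changed: Split A's single fused loop into two passes: pass 1 runs the quote state machine once to precompute a boolean inside-quotes mask, pass 2 is a comprehension over enumerate(expr) that collects '$' positions using the mask and a slice expr[i+1:i+2] for the follower test.
import Mathlib
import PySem

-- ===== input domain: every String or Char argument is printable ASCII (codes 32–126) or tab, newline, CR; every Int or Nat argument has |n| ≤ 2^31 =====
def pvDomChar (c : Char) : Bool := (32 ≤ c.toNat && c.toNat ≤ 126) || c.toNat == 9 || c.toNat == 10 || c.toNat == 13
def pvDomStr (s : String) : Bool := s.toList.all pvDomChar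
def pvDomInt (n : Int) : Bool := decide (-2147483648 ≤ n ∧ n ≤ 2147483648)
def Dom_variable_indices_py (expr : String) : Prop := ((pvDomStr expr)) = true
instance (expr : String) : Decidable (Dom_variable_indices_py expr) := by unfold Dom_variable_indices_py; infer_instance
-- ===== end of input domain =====

-- B splits A's fused loop into two passes (quote mask, then a collecting comprehension); same O(n) cost, different decomposition.

-- ===== PORT A =====
-- the if/elif quote toggles of A's loop body, on state (in_single, in_double)
def pvAStep (c : Char) (in_single in_double : Bool) : Bool × Bool :=
  if c = '\'' && !in_double then (!in_single, in_double)
  else if c = '"' && !in_single then (in_single, !in_double)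
  else (in_single, in_double)

-- next_char.isalpha() or next_char in "_{(": on the empty next_char (idx+1 = len), "" in "_{(" is True in Python.
def pvFollows (rest : List Char) : Bool :=
  match rest with
  | [] => true               -- next_char = "": "".isalpha() is False but "" in "_{(" is True
  | c :: _ => c.isAlpha || c = '_' || c = '{' || c = '('

-- the for-loop of A, state (idx, in_single, in_double, indices)
def pvALoop : List Char → Int → Bool → Bool → List Int → List Int
  | [], _, _, _, indices => indices
  | c :: rest, idx, in_single, in_double, indices =>
    match pvAStep c in_single in_double with
    | (s', d') =>
      if s' || d' then
        pvALoop rest (idx + 1) s' d' indices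
      else if c = '$' && pvFollows rest then
        pvALoop rest (idx + 1) s' d' (indices ++ [idx])
      else
        pvALoop rest (idx + 1) s' d' indices

def variable_indices_py (expr : String) : List Int :=
  pvALoop expr.toList 0 false false []

-- ===== PORT B =====
-- the same if/elif quote toggles as they appear in pass 1 of Source B
def pvBStep (c : Char) (in_single in_double : Bool) : Bool × Bool :=
  if c = '\'' && !in_double then (!in_single, in_double)
  else if c = '"' && !in_single then (in_single, !in_double)
  else (in_single, in_double)

-- pass 1 of Source B: the quote mask (appending in_single or in_double after each update)
def pvMask : List Char → Bool → Bool → List Bool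
  | [], _, _ => []
  | c :: rest, in_single, in_double =>
    match pvBStep c in_single in_double with
    | (s', d') => (s' || d') :: pvMask rest s' d'

-- expr[i+1:i+2].isalpha() or expr[i+1:i+2] in "_{(" — on the 0-or-1-char slice
def pvFollowsB (rest : List (Char × Bool)) : Bool :=
  match rest with
  | [] => true
  | (c, _) :: _ => c.isAlpha || c = '_' || c = '{' || c = '('

-- pass 2 of Source B: the comprehension over enumerate(expr) paired with the mask
def pvBCollect : List (Char × Bool) → Int → List Int
  | [], _ => []
  | (c, ins) :: rest, i =>
    if !ins && c = '$' && pvFollowsB rest then i :: pvBCollect rest (i + 1)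
    else pvBCollect rest (i + 1)

def variable_indices_py_alt (expr : String) : List Int :=
  pvBCollect (expr.toList.zip (pvMask expr.toList false false)) 0

-- ===== PRECONDITION & SPEC =====
def Spec_variable_indices_py (expr : String) (out : List Int) : Prop := out = variable_indices_py_alt expr
instance (expr : String) (out : List Int) : Decidable (Spec_variable_indices_py expr out) := by unfold Spec_variable_indices_py; infer_instance

-- ===== CLAIM (what is proved, stated in full; the proofs are below) =====
def Claim_equal_variable_indices_py : Prop := ∀ (expr : String), Dom_variable_indices_py expr → Spec_variable_indices_py expr (variable_indices_py expr)

-- ===== LEMMAS AND PROOFS =====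

theorem pvBStep_eq_pvAStep (c : Char) (s d : Bool) : pvBStep c s d = pvAStep c s d := rfl

theorem pvMask_length (cs : List Char) (s d : Bool) : (pvMask cs s d).length = cs.length := by
  induction cs generalizing s d with
  | nil => simp [pvMask]
  | cons c rest ih =>
    rw [pvMask]
    rcases pvBStep c s d with ⟨s', d'⟩
    simp [ih]

theorem pvFollowsB_zip (rest : List Char) (m : List Bool) (h : rest.length ≤ m.length) :
    pvFollowsB (rest.zip m) = pvFollows rest := by
  cases rest with
  | nil => rfl
  | cons c t =>
    cases m with
    | nil => simp at h
    | cons b mt => rfl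

theorem pvALoop_eq (cs : List Char) (idx : Int) (s d : Bool) (acc : List Int) :
    pvALoop cs idx s d acc = acc ++ pvBCollect (cs.zip (pvMask cs s d)) idx := by
  induction cs generalizing idx s d acc with
  | nil => simp [pvALoop, pvMask, pvBCollect]
  | cons c rest ih =>
    rw [pvALoop, pvMask, pvBStep_eq_pvAStep]
    rcases hsd : pvAStep c s d with ⟨s', d'⟩
    have hf : pvFollowsB (rest.zip (pvMask rest s' d')) = pvFollows rest :=
      pvFollowsB_zip _ _ (by rw [pvMask_length])
    rw [List.zip_cons_cons, pvBCollect, hf]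
    cases s' <;> cases d' <;> simp only [Bool.or_self, Bool.or_true, Bool.true_or,
      Bool.not_false, Bool.not_true, Bool.true_and, Bool.false_and, if_true] <;>
    · simp only [ih]
      split_ifs <;> simp_all

-- ===== VERDICT (by name: the statement is the Claim_ definition above) =====
theorem variable_indices_py_spec : Claim_equal_variable_indices_py := by
  intro expr _
  unfold Spec_variable_indices_py variable_indices_py variable_indices_py_alt
  simpa using pvALoop_eq expr.toList 0 false false []
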